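-- pv_equiv track=rewrite | github.com/pypi-data/pypi-mirror-60 | packages/mhelper/mhelper-1.0.1.75.tar.gz/mhelper-1.0.1.75/mhelper/string_helper.py | constrain_chars
-- ===== SOURCE A (Python) =====
-- def constrain_chars( input: str, permitted = "aA0", replace = "_" ):
--     r = []
--     v = False
--
--     permitted = permitted.replace( "a", "abcdefghijklmnopqrstuvwxyz" )
--     permitted = permitted.replace( "A", "ABCDEFGHIJKLMNOPQRSTUVWXYZ" )
--     permitted = permitted.replace( "0", "0123456789" )
--
--     for c in input:
--         if c in permitted:
--             r.append( c )
--             v = True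
--         else:
--             if v:
--                 r.append( replace )
--                 v = False
--
--     return "".join( r ).rstrip( replace )
-- ===== SOURCE B (Python) =====
-- def constrain_chars(input: str, permitted="aA0", replace="_"):
--     permitted = permitted.replace("a", "abcdefghijklmnopqrstuvwxyz")
--     permitted = permitted.replace("A", "ABCDEFGHIJKLMNOPQRSTUVWXYZ")
--     permitted = permitted.replace("0", "0123456789")
--     pset = set(permitted)
--     runs = []
--     i, n = 0, len(input)
--     while i < n:
--         if input[i] in pset:
--             j = i
--             while j < n and input[j] in pset:
--                 j += 1
--             runs.append(input[i:j])
--             i = j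
--         else:
--             i += 1
--     return replace.join(runs).rstrip(replace)
-- ===== Notes on version B (the rewrite author's own statement) =====
-- stated objective: alternative
-- what changed: B splits the input into maximal runs of permitted characters by index scanning, then joins the runs with the replacement and rstrips, instead of A's char-by-char streaming with a pending-separator boolean flag.
import Mathlib
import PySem

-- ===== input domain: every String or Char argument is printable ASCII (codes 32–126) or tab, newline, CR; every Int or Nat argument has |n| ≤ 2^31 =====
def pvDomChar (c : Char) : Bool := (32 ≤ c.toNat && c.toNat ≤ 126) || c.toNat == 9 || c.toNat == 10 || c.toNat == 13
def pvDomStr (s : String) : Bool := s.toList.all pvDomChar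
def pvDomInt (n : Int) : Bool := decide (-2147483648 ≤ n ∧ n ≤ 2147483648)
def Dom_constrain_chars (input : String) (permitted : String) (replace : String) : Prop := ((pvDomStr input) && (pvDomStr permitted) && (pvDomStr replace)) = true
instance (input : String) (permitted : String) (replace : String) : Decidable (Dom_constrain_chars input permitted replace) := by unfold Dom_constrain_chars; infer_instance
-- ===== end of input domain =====

-- B restructures A's single streaming loop with a pending-separator flag into run extraction + join + rstrip (objective: alternative; same cost).

-- ===== PORT A =====
-- 'permitted.replace(...)' expansions; then the streaming loop; 'c in permitted' on a
-- single character c is exactly char membership in permitted's characters (exact);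
-- str.rstrip(chars) has no PySem primitive: ported by hand as dropping trailing
-- characters that belong to chars (exact Python semantics, incl. chars = "").
def constrain_chars (input : String) (permitted : String) (replace : String) : String :=
  let p1 := PySem.Str.replace permitted "a" "abcdefghijklmnopqrstuvwxyz"
  let p2 := PySem.Str.replace p1 "A" "ABCDEFGHIJKLMNOPQRSTUVWXYZ"
  let p3 := PySem.Str.replace p2 "0" "0123456789"
  let st := input.toList.foldl
    (fun (acc : List Char × Bool) c =>
      if c ∈ p3.toList then (acc.1 ++ [c], true)
      else if acc.2 then (acc.1 ++ replace.toList, false) else (acc.1, false))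
    ([], false)
  String.ofList ((st.1.reverse.dropWhile (· ∈ replace.toList)).reverse)

-- ===== PORT B =====
-- Source B's run scanner: at a permitted character take the whole maximal run (inner
-- while j loop = takeWhile/dropWhile), otherwise skip one character.
def pvRuns (p : List Char) : List Char → List (List Char)
  | [] => []
  | c :: cs =>
    if c ∈ p then (c :: cs.takeWhile (· ∈ p)) :: pvRuns p (cs.dropWhile (· ∈ p))
    else pvRuns p cs
termination_by l => l.length
decreasing_by
  · have := List.length_dropWhile_le (· ∈ p) cs; simp; omega
  · simp

-- replace.join(runs) is PySem.Chars.join; rstrip(replace) ported by hand as in port A (exact).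
def constrain_chars_alt (input : String) (permitted : String) (replace : String) : String :=
  let p1 := PySem.Str.replace permitted "a" "abcdefghijklmnopqrstuvwxyz"
  let p2 := PySem.Str.replace p1 "A" "ABCDEFGHIJKLMNOPQRSTUVWXYZ"
  let p3 := PySem.Str.replace p2 "0" "0123456789"
  let joined := PySem.Chars.join replace.toList (pvRuns p3.toList input.toList)
  String.ofList ((joined.reverse.dropWhile (· ∈ replace.toList)).reverse)

-- ===== PRECONDITION & SPEC =====
def Spec_constrain_chars (input : String) (permitted : String) (replace : String) (out : String) : Prop := out = constrain_chars_alt input permitted replace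
instance (input : String) (permitted : String) (replace : String) (out : String) : Decidable (Spec_constrain_chars input permitted replace out) := by unfold Spec_constrain_chars; infer_instance

-- ===== CLAIM (what is proved, stated in full; the proofs are below) =====
def Claim_equal_constrain_chars : Prop := ∀ (input : String) (permitted : String) (replace : String), Dom_constrain_chars input permitted replace → Spec_constrain_chars input permitted replace (constrain_chars input permitted replace)

-- ===== LEMMAS AND PROOFS =====

-- the characters A's loop has emitted, as a recursion on the input (v = pending-separator flag)
def pvEmit (p repl : List Char) : Bool → List Char → List Char
  | _, [] => []
  | v, c :: cs =>
    if c ∈ p then c :: pvEmit p repl true cs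
    else (if v then repl else []) ++ pvEmit p repl false cs

theorem pvFold_eq (p repl : List Char) (l : List Char) (r : List Char) (v : Bool) :
    (l.foldl
      (fun (acc : List Char × Bool) c =>
        if c ∈ p then (acc.1 ++ [c], true)
        else if acc.2 then (acc.1 ++ repl, false) else (acc.1, false))
      (r, v)).1 = r ++ pvEmit p repl v l := by
  induction l generalizing r v with
  | nil => simp [pvEmit]
  | cons c cs ih =>
    by_cases h : c ∈ p
    · simp [pvEmit, h, ih]
    · cases v <;> simp [pvEmit, h, ih]

theorem pvEmit_true (p repl : List Char) (l : List Char) :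
    pvEmit p repl true l =
      l.takeWhile (· ∈ p) ++
        (match l.dropWhile (· ∈ p) with
         | [] => []
         | _ :: ds => repl ++ pvEmit p repl false ds) := by
  induction l with
  | nil => simp [pvEmit]
  | cons c cs ih =>
    by_cases h : c ∈ p
    · simp [pvEmit, h, ih]
    · simp [pvEmit, h]

theorem pvEmit_false_main (p repl : List Char) (l : List Char) :
    (pvEmit p repl false l = PySem.Chars.join repl (pvRuns p l) ∨
      pvEmit p repl false l = PySem.Chars.join repl (pvRuns p l) ++ repl) ∧
    (pvRuns p l = [] → pvEmit p repl false l = []) := by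
  suffices H : ∀ (n : Nat) (l : List Char), l.length ≤ n →
      (pvEmit p repl false l = PySem.Chars.join repl (pvRuns p l) ∨
        pvEmit p repl false l = PySem.Chars.join repl (pvRuns p l) ++ repl) ∧
      (pvRuns p l = [] → pvEmit p repl false l = []) from H l.length l le_rfl
  intro n
  induction n with
  | zero =>
    intro l hl
    rw [List.length_eq_zero_iff.mp (Nat.le_zero.mp hl)]
    simp [pvEmit, pvRuns, PySem.Chars.join_nil]
  | succ n ih =>
  intro l hl
  match l with
  | [] => simp [pvEmit, pvRuns, PySem.Chars.join_nil]
  | c :: cs =>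
    have hcs : cs.length ≤ n := by simp at hl; omega
    by_cases h : c ∈ p
    · rw [show pvRuns p (c :: cs) =
        (c :: cs.takeWhile (· ∈ p)) :: pvRuns p (cs.dropWhile (· ∈ p)) by
          rw [pvRuns]; simp [h]]
      have he : pvEmit p repl false (c :: cs) = c :: pvEmit p repl true cs := by
        simp [pvEmit, h]
      rw [he, pvEmit_true]
      rcases hd : cs.dropWhile (· ∈ p) with _ | ⟨d, ds⟩
      · constructor
        · left
          rw [show pvRuns p ([] : List Char) = [] from by rw [pvRuns]]
          simp [PySem.Chars.join_singleton]
        · intro hrun; simp at hrun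
      · have hdlen : ds.length < cs.length := by
          have := List.length_dropWhile_le (· ∈ p) cs
          rw [hd] at this; simp at this; omega
        have hdnp : d ∉ p := by
          have hne : List.dropWhile (fun x => decide (x ∈ p)) cs ≠ [] := by rw [hd]; simp
          have h2 := List.head_dropWhile_not (fun x => decide (x ∈ p)) hne
          simp [hd] at h2
          exact h2
        have hruns_d : pvRuns p (d :: ds) = pvRuns p ds := by
          rw [pvRuns]; simp [hdnp]
        have ihds := ih ds (by omega)
        rw [hruns_d]
        constructor
        · rcases hr : pvRuns p ds with _ | ⟨r, rs⟩
          · right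
            have : pvEmit p repl false ds = [] := ihds.2 hr
            simp [this, PySem.Chars.join_singleton]
          · have hjoin : PySem.Chars.join repl
                ((c :: cs.takeWhile (· ∈ p)) :: r :: rs) =
                (c :: cs.takeWhile (· ∈ p)) ++ repl ++ PySem.Chars.join repl (r :: rs) := by
              simp [PySem.Chars.join_cons_cons]
            rw [hjoin]
            rcases ihds.1 with h1 | h1 <;> rw [hr] at h1
            · left; simp [h1]
            · right; simp [h1]
        · intro hrun; simp at hrun
    · have he : pvEmit p repl false (c :: cs) = pvEmit p repl false cs := by
        simp [pvEmit, h]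
      have hr : pvRuns p (c :: cs) = pvRuns p cs := by rw [pvRuns]; simp [h]
      rw [he, hr]
      exact ih cs hcs

-- rstrip(chars) absorbs a trailing copy of chars
theorem pvRstrip_append (x repl : List Char) :
    ((x ++ repl).reverse.dropWhile (· ∈ repl)).reverse =
      (x.reverse.dropWhile (· ∈ repl)).reverse := by
  rw [List.reverse_append, List.dropWhile_append]
  have : repl.reverse.dropWhile (· ∈ repl) = [] := by
    rw [List.dropWhile_eq_nil_iff]
    intro c hc; simpa using List.mem_reverse.mp hc
  simp [this]

-- ===== VERDICT (by name: the statement is the Claim_ definition above) =====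
theorem constrain_chars_spec : Claim_equal_constrain_chars := by
  intro input permitted replace _
  unfold Spec_constrain_chars constrain_chars constrain_chars_alt
  set p3 := PySem.Str.replace (PySem.Str.replace (PySem.Str.replace permitted "a" "abcdefghijklmnopqrstuvwxyz") "A" "ABCDEFGHIJKLMNOPQRSTUVWXYZ") "0" "0123456789" with hp3
  simp only
  rw [pvFold_eq p3.toList replace.toList input.toList [] false]
  rcases (pvEmit_false_main p3.toList replace.toList input.toList).1 with h | h
  · rw [h]; simp [hp3]
  · rw [h, List.nil_append, pvRstrip_append]
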